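-- pv_equiv track=rewrite | github.com/decoct-io/decoct | src/decoct/compression/archetypal.py | _collapse_removals
-- ===== SOURCE A (Python) =====
-- from typing import Any
--
-- def _collapse_removals(removed: set[str], class_flat: dict[str, Any]) -> list[str]:
--     """Collapse leaf removals to parent when *all* children are removed."""
--     if not removed:
--         return []
--     result = set(removed)
--     changed = True
--     while changed:
--         changed = False
--         parents: set[str] = set()
--         for path in result:
--             parts = path.split(".")
--             for i in range(1, len(parts)):
--                 parents.add(".".join(parts[:i]))
--         for parent in sorted(parents, key=lambda x: -len(x)):
--             children_class = {p for p in class_flat if p.startswith(parent + ".")}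
--             if not children_class:
--                 continue
--             children_result = {p for p in result if p.startswith(parent + ".")}
--             if children_class == children_result:
--                 result -= children_result
--                 result.add(parent)
--                 changed = True
--                 break
--     return sorted(result)
-- ===== SOURCE B (Python) =====
-- def _collapse_removals(removed: set[str], class_flat: dict) -> list[str]:
--     """Collapse leaf removals to parent when *all* children are removed.
--
--     Single descending-depth pass: every parent a collapse could ever reach is a
--     dotted prefix of an originally removed path, and processing prefixes from
--     longest to shortest makes one pass enough -- no restart loop needed.
--     """
--     result = set(removed)
--     parents = {
--         ".".join(parts[:i])
--         for path in removed
--         for parts in (path.split("."),)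
--         for i in range(1, len(parts))
--     }
--     for parent in sorted(parents, key=len, reverse=True):
--         children_class = {p for p in class_flat if p.startswith(parent + ".")}
--         if children_class and children_class == {
--             p for p in result if p.startswith(parent + ".")
--         }:
--             result -= children_class
--             result.add(parent)
--     return sorted(result)
-- ===== Notes on version B (the rewrite author's own statement) =====
-- stated objective: simpler
-- what changed: A restarts the whole parents-recomputation-and-scan loop after every single collapse (while changed / break); B computes the dotted prefixes of the originally removed paths once and does a single longest-to-shortest pass over them, collapsing greedily, with no restart loop.
import Mathlib
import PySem

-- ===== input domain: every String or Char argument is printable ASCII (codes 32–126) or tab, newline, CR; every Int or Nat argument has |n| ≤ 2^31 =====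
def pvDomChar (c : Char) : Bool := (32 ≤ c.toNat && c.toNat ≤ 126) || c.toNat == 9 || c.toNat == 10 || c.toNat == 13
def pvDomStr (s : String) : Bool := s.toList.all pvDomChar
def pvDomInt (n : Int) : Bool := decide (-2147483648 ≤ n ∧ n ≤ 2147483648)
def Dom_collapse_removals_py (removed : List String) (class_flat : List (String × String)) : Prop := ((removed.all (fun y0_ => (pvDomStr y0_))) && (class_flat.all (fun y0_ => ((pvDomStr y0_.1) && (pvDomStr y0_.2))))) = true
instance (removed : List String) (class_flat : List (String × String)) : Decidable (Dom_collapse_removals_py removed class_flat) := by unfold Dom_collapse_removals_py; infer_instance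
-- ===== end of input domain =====

-- B replaces A's restart-the-whole-scan-after-every-collapse while-loop by ONE pass over the
-- dotted prefixes of the originally removed paths, processed from longest to shortest (alternative decomposition).


-- ===== PORT A =====
-- pvMeasure and aScan_dec justify the termination of A's `while changed:` loop
-- (each collapse strictly shrinks the total length of the paths in `result`).
def pvMeasure (s : List String) : Nat := (s.map (fun x => x.toList.length)).sum

-- parents = set(); for path in result: parts = path.split("."); for i in range(1, len(parts)): parents.add(".".join(parts[:i]))
def aParents (result : PySem.Set String) : PySem.Set String :=
  result.foldl
    (fun parents path =>
      let parts : List String := (PySem.Chars.splitOn path.toList ['.']).map String.ofList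
      (PySem.List.pyRange 1 (parts.length : Int) 1).foldl
        (fun parents i =>
          PySem.Set.add parents (PySem.Str.join "." (PySem.List.slice parts none (some i))))
        parents)
    PySem.Set.empty

-- the `for parent in sorted(parents, key=lambda x: -len(x)):` body, with `continue`/`break`:
-- returns the new `result` of the first collapsing parent (Python then breaks with changed=True), none if the for-loop falls through
def aScan (class_flat : List (String × String)) (result : PySem.Set String) :
    List String → Option (PySem.Set String)
  | [] => none
  | parent :: rest =>
    let children_class : PySem.Set String :=
      PySem.Set.ofList ((class_flat.map Prod.fst).filter
        (fun p => PySem.Str.startswith p (parent ++ ".")))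
    if children_class = [] then
      aScan class_flat result rest
    else
      let children_result : PySem.Set String :=
        PySem.Set.ofList (result.filter (fun p => PySem.Str.startswith p (parent ++ ".")))
      if PySem.Set.equal children_class children_result then
        some (PySem.Set.add (PySem.Set.diff result children_result) parent)
      else
        aScan class_flat result rest

theorem aScan_dec : ∀ {l : List String} {cf : List (String × String)} {σ σ' : PySem.Set String},
    aScan cf σ l = some σ' → pvMeasure σ' < pvMeasure σ := by
  intro l
  induction l with
  | nil => intro cf σ σ' h; simp [aScan] at h
  | cons parent rest ih =>
    intro cf σ σ' h
    rw [aScan] at h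
    dsimp only at h
    split_ifs at h with h1 h2
    · exact ih h
    · -- the collapse branch: `result` lost a nonempty set of strictly longer paths, gained `parent`
      injection h with h
      subst h
      set sw : String → Bool := fun p => PySem.Str.startswith p (parent ++ ".") with hsw
      obtain ⟨x, hx⟩ := List.exists_mem_of_ne_nil _ h1
      have hxcr : x ∈ PySem.Set.ofList (List.filter sw σ) :=
        ((PySem.Set.equal_iff _ _).mp h2 x).mp hx
      rw [PySem.Set.mem_ofList, List.mem_filter] at hxcr
      have hdiff : PySem.Set.diff σ (PySem.Set.ofList (List.filter sw σ))
          = σ.filter (fun y => !sw y) := by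
        show σ.filter _ = σ.filter _
        apply List.filter_congr
        intro y hy
        by_cases hswy : sw y
        · simp [hswy, PySem.Set.mem_ofList, List.mem_filter, hy]
        · simp only [Bool.not_eq_true] at hswy
          simp [PySem.Set.mem_ofList, List.mem_filter, hswy]
      have hadd : pvMeasure (PySem.Set.add (PySem.Set.diff σ (PySem.Set.ofList (List.filter sw σ))) parent)
          ≤ pvMeasure (PySem.Set.diff σ (PySem.Set.ofList (List.filter sw σ))) + parent.toList.length := by
        rw [PySem.Set.add_eq_ite]
        split
        · omega
        · simp [pvMeasure]
      have hsplit : pvMeasure (σ.filter sw) + pvMeasure (σ.filter (fun y => !sw y)) = pvMeasure σ := by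
        have h := ((List.filter_append_perm sw σ).map (fun x => x.toList.length)).sum_eq
        simpa [pvMeasure] using h
      have hbig : parent.toList.length < pvMeasure (σ.filter sw) := by
        have hmem : x.toList.length ∈ (σ.filter sw).map (fun y => y.toList.length) :=
          List.mem_map_of_mem (List.mem_filter.mpr hxcr)
        have hsum := List.single_le_sum (l := (σ.filter sw).map (fun y => y.toList.length))
          (fun _ _ => Nat.zero_le _) _ hmem
        have hlen : parent.toList.length < x.toList.length := by
          have h : PySem.Str.startswith x (parent ++ ".") = true := hxcr.2
          rw [PySem.Str.startswith_eq] at h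
          have hp := (PySem.Chars.startswith_iff _ _).mp h
          rw [String.toList_append] at hp
          have hl := hp.length_le
          rw [List.length_append] at hl
          have : (".").toList.length = 1 := rfl
          omega
        simp only [pvMeasure]
        omega
      rw [hdiff] at hadd
      show pvMeasure (PySem.Set.add (PySem.Set.diff σ (PySem.Set.ofList (List.filter sw σ))) parent) < pvMeasure σ
      rw [hdiff]
      omega
    · exact ih h

-- while changed: changed = False; …; (collapse; changed = True; break)
def aLoop (class_flat : List (String × String)) (result : PySem.Set String) : PySem.Set String :=
  match _h : aScan class_flat result
      (PySem.List.sorted (aParents result) (fun x => -(PySem.Str.len x)) false) with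
  | some result' => aLoop class_flat result'
  | none => result
termination_by pvMeasure result
decreasing_by exact aScan_dec _h

def collapse_removals_py (removed : List String) (class_flat : List (String × String)) : List String :=
  if removed = [] then []
  else PySem.List.sorted (aLoop class_flat (PySem.Set.ofList removed)) (fun x => x) false

-- ===== PORT B =====
def collapse_removals_py_alt (removed : List String) (class_flat : List (String × String)) : List String :=
  -- parents = { ".".join(parts[:i]) for path in removed for parts in (path.split("."),) for i in range(1, len(parts)) }
  let parents : PySem.Set String :=
    PySem.Set.ofList
      (removed.flatMap (fun path =>
        let parts : List String := (PySem.Chars.splitOn path.toList ['.']).map String.ofList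
        (PySem.List.pyRange 1 (parts.length : Int) 1).map
          (fun i => PySem.Str.join "." (PySem.List.slice parts none (some i)))))
  -- for parent in sorted(parents, key=len, reverse=True): … (one pass, no restart)
  let final : PySem.Set String :=
    (PySem.List.sorted parents (fun x => PySem.Str.len x) true).foldl
      (fun result parent =>
        let children_class : PySem.Set String :=
          PySem.Set.ofList ((class_flat.map Prod.fst).filter
            (fun p => PySem.Str.startswith p (parent ++ ".")))
        if children_class ≠ [] ∧ PySem.Set.equal children_class
            (PySem.Set.ofList (result.filter (fun p => PySem.Str.startswith p (parent ++ ".")))) = true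
        then PySem.Set.add (PySem.Set.diff result children_class) parent
        else result)
      (PySem.Set.ofList removed)
  PySem.List.sorted final (fun x => x) false

-- ===== PRECONDITION & SPEC =====
def Spec_collapse_removals_py (removed : List String) (class_flat : List (String × String)) (out : List String) : Prop := out = collapse_removals_py_alt removed class_flat
instance (removed : List String) (class_flat : List (String × String)) (out : List String) : Decidable (Spec_collapse_removals_py removed class_flat out) := by unfold Spec_collapse_removals_py; infer_instance

-- ===== CLAIM (what is proved, stated in full; the proofs are below) =====
def Claim_equal_collapse_removals_py : Prop := ∀ (removed : List String) (class_flat : List (String × String)), Dom_collapse_removals_py removed class_flat → Spec_collapse_removals_py removed class_flat (collapse_removals_py removed class_flat)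

-- ===== LEMMAS AND PROOFS =====

-- ---------- dotted-prefix relation and membership-level tools ----------

-- "y starts with p + '.'"
def pvDP (p y : String) : Prop := p.toList ++ ['.'] <+: y.toList

-- two lists with the same members
def pvEqv (σ τ : List String) : Prop := ∀ x : String, x ∈ σ ↔ x ∈ τ

-- the class-side children of a parent (shared sub-expression of both ports)
def pvCC (class_flat : List (String × String)) (p : String) : List String :=
  (class_flat.map Prod.fst).filter (fun q => PySem.Str.startswith q (p ++ "."))

-- "parent p collapses in state σ": class children nonempty and = σ-children as sets
def pvEligB (class_flat : List (String × String)) (σ : List String) (p : String) : Bool :=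
  !(pvCC class_flat p).isEmpty &&
    ((pvCC class_flat p).all (fun x => decide (x ∈ σ)) &&
      σ.all (fun x => !(PySem.Str.startswith x (p ++ ".")) || decide (x ∈ pvCC class_flat p)))

-- canonical collapse of state σ at parent p
def pvCollapse (σ : List String) (p : String) : List String :=
  σ.filter (fun y => !PySem.Str.startswith y (p ++ ".")) ++ [p]

def pvStep (class_flat : List (String × String)) (σ : List String) (p : String) : List String :=
  if pvEligB class_flat σ p then pvCollapse σ p else σ

def pvFold (class_flat : List (String × String)) (L : List String) (σ : List String) : List String :=
  L.foldl (pvStep class_flat) σ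

theorem pvEqv_refl (σ : List String) : pvEqv σ σ := fun _ => Iff.rfl
theorem pvEqv_symm {σ τ : List String} (h : pvEqv σ τ) : pvEqv τ σ := fun x => (h x).symm
theorem pvEqv_trans {σ τ ρ : List String} (h1 : pvEqv σ τ) (h2 : pvEqv τ ρ) : pvEqv σ ρ :=
  fun x => (h1 x).trans (h2 x)

theorem pvSw_iff (y p : String) : PySem.Str.startswith y (p ++ ".") = true ↔ pvDP p y := by
  rw [PySem.Str.startswith_eq, PySem.Chars.startswith_iff, String.toList_append]
  exact Iff.rfl

theorem pvDP_len {p y : String} (h : pvDP p y) : p.toList.length < y.toList.length := by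
  have hle := h.length_le
  rw [List.length_append] at hle
  have h1 : (['.'] : List Char).length = 1 := rfl
  omega

theorem pvDP_trans {p q y : String} (h1 : pvDP p q) (h2 : pvDP q y) : pvDP p y := by
  exact h1.trans ((List.prefix_append q.toList ['.']).trans h2)

theorem pvDP_irrefl (p : String) : ¬ pvDP p p := fun h => absurd (pvDP_len h) (lt_irrefl _)

theorem pvDP_comparable {a b x : String} (hax : pvDP a x) (hbx : pvDP b x)
    (hlen : a.toList.length ≤ b.toList.length) : a = b ∨ pvDP a b := by
  have h : a.toList ++ ['.'] <+: b.toList ++ ['.'] :=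
    List.prefix_of_prefix_length_le hax hbx (by simp only [List.length_append]; omega)
  by_cases heq : a.toList.length = b.toList.length
  · left
    have he := h.eq_of_length (by simp [heq])
    have : a.toList = b.toList := by
      have := List.append_inj_left' he (by rfl)
      exact this
    exact String.toList_inj.mp this
  · right
    have h1 : (['.'] : List Char).length = 1 := rfl
    exact List.prefix_of_prefix_length_le h (List.prefix_append _ _)
      (by rw [List.length_append]; omega)

theorem pvDP_incomp {a b x : String} (hab : ¬ pvDP a b) (hba : ¬ pvDP b a) (hne : a ≠ b) :
    ¬ (pvDP a x ∧ pvDP b x) := by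
  rintro ⟨ha, hb⟩
  rcases Nat.le_total a.toList.length b.toList.length with hle | hle
  · rcases pvDP_comparable ha hb hle with h | h
    · exact hne h
    · exact hab h
  · rcases pvDP_comparable hb ha hle with h | h
    · exact hne h.symm
    · exact hba h

theorem mem_pvCC {class_flat : List (String × String)} {p x : String} :
    x ∈ pvCC class_flat p ↔ x ∈ class_flat.map Prod.fst ∧ pvDP p x := by
  rw [pvCC, List.mem_filter, pvSw_iff]

theorem pvEligB_iff {class_flat : List (String × String)} {σ : List String} {p : String} :
    pvEligB class_flat σ p = true ↔
      (pvCC class_flat p ≠ [] ∧ (∀ x ∈ pvCC class_flat p, x ∈ σ) ∧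
        (∀ x ∈ σ, pvDP p x → x ∈ pvCC class_flat p)) := by
  rw [pvEligB]
  simp only [Bool.and_eq_true, Bool.not_eq_true', List.isEmpty_eq_false_iff, List.all_eq_true,
    decide_eq_true_eq, Bool.or_eq_true]
  constructor
  · rintro ⟨h1, h2, h3⟩
    refine ⟨h1, h2, fun x hx hdp => ?_⟩
    rcases h3 x hx with h | h
    · exact absurd ((pvSw_iff x p).mpr hdp) (by rw [h]; exact Bool.false_ne_true)
    · exact h
  · rintro ⟨h1, h2, h3⟩
    refine ⟨h1, h2, fun x hx => ?_⟩
    by_cases hsw : PySem.Str.startswith x (p ++ ".") = true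
    · exact Or.inr (h3 x hx ((pvSw_iff x p).mp hsw))
    · exact Or.inl (by rw [Bool.eq_false_iff]; exact hsw)

theorem pvElig_exists_child {class_flat : List (String × String)} {σ : List String} {p : String}
    (h : pvEligB class_flat σ p = true) : ∃ y ∈ σ, pvDP p y := by
  rw [pvEligB_iff] at h
  obtain ⟨x, hx⟩ := List.exists_mem_of_ne_nil _ h.1
  exact ⟨x, h.2.1 x hx, (mem_pvCC.mp hx).2⟩

theorem mem_pvCollapse {σ : List String} {p x : String} :
    x ∈ pvCollapse σ p ↔ (x ∈ σ ∧ ¬ pvDP p x) ∨ x = p := by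
  rw [pvCollapse, List.mem_append, List.mem_filter, List.mem_singleton,
    Bool.not_eq_true', Bool.eq_false_iff, ne_eq, pvSw_iff]

theorem pvEligB_congr {class_flat : List (String × String)} {σ τ : List String} {p : String}
    (h : pvEqv σ τ) : pvEligB class_flat σ p = pvEligB class_flat τ p := by
  rw [Bool.eq_iff_iff, pvEligB_iff, pvEligB_iff]
  constructor
  · rintro ⟨h1, h2, h3⟩
    exact ⟨h1, fun x hx => (h x).mp (h2 x hx), fun x hx hdp => h3 x ((h x).mpr hx) hdp⟩
  · rintro ⟨h1, h2, h3⟩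
    exact ⟨h1, fun x hx => (h x).mpr (h2 x hx), fun x hx hdp => h3 x ((h x).mp hx) hdp⟩

theorem pvCollapse_congr {σ τ : List String} {p : String} (h : pvEqv σ τ) :
    pvEqv (pvCollapse σ p) (pvCollapse τ p) := by
  intro x
  rw [mem_pvCollapse, mem_pvCollapse, h x]

theorem pvStep_congr {class_flat : List (String × String)} {σ τ : List String} {p : String}
    (h : pvEqv σ τ) : pvEqv (pvStep class_flat σ p) (pvStep class_flat τ p) := by
  rw [pvStep, pvStep, pvEligB_congr h]
  split
  · exact pvCollapse_congr h
  · exact h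

theorem pvFold_congr {class_flat : List (String × String)} :
    ∀ (L : List String) {σ τ : List String}, pvEqv σ τ →
      pvEqv (pvFold class_flat L σ) (pvFold class_flat L τ) := by
  intro L
  induction L with
  | nil => intro σ τ h; exact h
  | cons p rest ih => intro σ τ h; exact ih (pvStep_congr h)

theorem pvFold_id {class_flat : List (String × String)} :
    ∀ {L σ}, (∀ p ∈ L, pvEligB class_flat σ p = false) → pvFold class_flat L σ = σ := by
  intro L
  induction L with
  | nil => intro σ _; rfl
  | cons p rest ih =>
    intro σ h
    show pvFold class_flat rest (pvStep class_flat σ p) = σ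
    rw [pvStep, h p (List.mem_cons_self), if_neg (by simp)]
    exact ih (fun q hq => h q (List.mem_cons_of_mem _ hq))

theorem pvElig_kill {class_flat : List (String × String)} {σ : List String} {p q : String}
    (h : p = q ∨ pvDP q p) : pvEligB class_flat (pvCollapse σ q) p = false := by
  by_contra hc
  rw [Bool.not_eq_false, pvEligB_iff] at hc
  obtain ⟨h1, h2, _⟩ := hc
  obtain ⟨x, hx⟩ := List.exists_mem_of_ne_nil _ h1
  have hdp : pvDP p x := (mem_pvCC.mp hx).2
  have hxc := mem_pvCollapse.mp (h2 x hx)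
  rcases hxc with ⟨_, hnq⟩ | hxq
  · rcases h with rfl | hqp
    · exact hnq hdp
    · exact hnq (pvDP_trans hqp hdp)
  · subst hxq
    rcases h with rfl | hqp
    · exact pvDP_irrefl _ hdp
    · have := pvDP_len hdp
      have := pvDP_len hqp
      omega

theorem pvCollapse_mem_shift {σ : List String} {p q x : String} (hne : p ≠ q)
    (hqp : ¬ pvDP q p) (hpq : ¬ pvDP p q) :
    (x ∈ pvCollapse σ q ∧ pvDP p x) ↔ (x ∈ σ ∧ pvDP p x) := by
  rw [mem_pvCollapse]
  constructor
  · rintro ⟨h, hdp⟩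
    rcases h with ⟨hσ, _⟩ | rfl
    · exact ⟨hσ, hdp⟩
    · exact absurd hdp hpq
  · rintro ⟨hσ, hdp⟩
    have hnq : ¬ pvDP q x := fun hq => pvDP_incomp hpq hqp hne ⟨hdp, hq⟩
    exact ⟨Or.inl ⟨hσ, hnq⟩, hdp⟩

theorem pvElig_pres {class_flat : List (String × String)} {σ : List String} {p q : String}
    (hne : p ≠ q) (hqp : ¬ pvDP q p) (hpq : ¬ pvDP p q) :
    pvEligB class_flat (pvCollapse σ q) p = pvEligB class_flat σ p := by
  rw [Bool.eq_iff_iff, pvEligB_iff, pvEligB_iff]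
  constructor
  · rintro ⟨h1, h2, h3⟩
    refine ⟨h1, fun x hx => ?_, fun x hx hdp => ?_⟩
    · exact ((pvCollapse_mem_shift hne hqp hpq).mp ⟨h2 x hx, (mem_pvCC.mp hx).2⟩).1
    · exact h3 x ((pvCollapse_mem_shift hne hqp hpq).mpr ⟨hx, hdp⟩).1 hdp
  · rintro ⟨h1, h2, h3⟩
    refine ⟨h1, fun x hx => ?_, fun x hx hdp => ?_⟩
    · exact ((pvCollapse_mem_shift hne hqp hpq).mpr ⟨h2 x hx, (mem_pvCC.mp hx).2⟩).1
    · exact h3 x ((pvCollapse_mem_shift hne hqp hpq).mp ⟨hx, hdp⟩).1 hdp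

theorem pvCommute {σ : List String} {p q : String} (hne : p ≠ q) (hpq : ¬ pvDP p q)
    (hqp : ¬ pvDP q p) :
    pvEqv (pvCollapse (pvCollapse σ q) p) (pvCollapse (pvCollapse σ p) q) := by
  intro x
  simp only [mem_pvCollapse]
  by_cases hxp : x = p
  · subst hxp; simp [hqp, hne]
  · by_cases hxq : x = q
    · subst hxq; simp [hpq, hne.symm]
    · simp [hxp, hxq]; tauto

theorem pvSwap {class_flat : List (String × String)} {q : String} :
    ∀ (L : List String) (σ : List String),
      List.Pairwise (fun a b => b.toList.length ≤ a.toList.length) L →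
      q ∈ L → pvEligB class_flat σ q = true →
      (∀ p : String, q.toList.length < p.toList.length → pvEligB class_flat σ p = false) →
      pvEqv (pvFold class_flat L σ) (pvFold class_flat L (pvCollapse σ q)) := by
  intro L
  induction L with
  | nil => intro σ _ hq; simp at hq
  | cons p rest ih =>
    intro σ hpw hqL helig hlong
    by_cases hpq : p = q
    · subst hpq
      show pvEqv (pvFold class_flat rest (pvStep class_flat σ p))
        (pvFold class_flat rest (pvStep class_flat (pvCollapse σ p) p))
      rw [pvStep, if_pos helig, pvStep, pvElig_kill (Or.inl rfl), if_neg (by simp)]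
      exact pvEqv_refl _
    · have hqrest : q ∈ rest := by
        rcases List.mem_cons.mp hqL with h | h
        · exact absurd h.symm hpq
        · exact h
      have hlen : q.toList.length ≤ p.toList.length := (List.pairwise_cons.mp hpw).1 q hqrest
      have hnpq : ¬ pvDP p q := fun h => by have := pvDP_len h; omega
      rcases Nat.lt_or_ge q.toList.length p.toList.length with hlt | hge
      · -- p strictly longer than q: ineligible on both sides
        have hfp : pvEligB class_flat σ p = false := hlong p hlt
        have hfp' : pvEligB class_flat (pvCollapse σ q) p = false := by
          by_cases hdp : pvDP q p
          · exact pvElig_kill (Or.inr hdp)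
          · rw [pvElig_pres hpq hdp hnpq]
            exact hfp
        show pvEqv (pvFold class_flat rest (pvStep class_flat σ p))
          (pvFold class_flat rest (pvStep class_flat (pvCollapse σ q) p))
        rw [pvStep, if_neg (by simp [hfp]), pvStep, if_neg (by simp [hfp'])]
        exact ih σ (List.pairwise_cons.mp hpw).2 hqrest helig hlong
      · -- equal length (p ≠ q): incomparable
        have heq : q.toList.length = p.toList.length := le_antisymm hlen hge
        have hnqp : ¬ pvDP q p := fun h => by have := pvDP_len h; omega
        have hpres : pvEligB class_flat (pvCollapse σ q) p = pvEligB class_flat σ p :=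
          pvElig_pres hpq hnqp hnpq
        show pvEqv (pvFold class_flat rest (pvStep class_flat σ p))
          (pvFold class_flat rest (pvStep class_flat (pvCollapse σ q) p))
        by_cases hep : pvEligB class_flat σ p = true
        · rw [pvStep, if_pos hep, pvStep, hpres, if_pos hep]
          have hq1 : pvEligB class_flat (pvCollapse σ p) q = true := by
            rw [pvElig_pres (fun h => hpq h.symm) hnpq hnqp]
            exact helig
          have hlong1 : ∀ r : String, q.toList.length < r.toList.length →
              pvEligB class_flat (pvCollapse σ p) r = false := by
            intro r hr
            by_cases hrp : r = p
            · subst hrp; omega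
            · by_cases hdp : pvDP p r
              · exact pvElig_kill (Or.inr hdp)
              · have hnrp : ¬ pvDP r p := fun h => by have := pvDP_len h; omega
                rw [pvElig_pres hrp hdp hnrp]
                exact hlong r hr
          have hih := ih (pvCollapse σ p) (List.pairwise_cons.mp hpw).2 hqrest hq1 hlong1
          refine pvEqv_trans hih (pvFold_congr rest ?_)
          exact pvEqv_symm (pvCommute hpq hnpq hnqp)
        · have hep' : pvEligB class_flat σ p = false := by simpa using hep
          rw [pvStep, if_neg (by simp [hep']), pvStep, hpres, if_neg (by simp [hep'])]
          exact ih σ (List.pairwise_cons.mp hpw).2 hqrest helig hlong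

-- ---------- the split/join prefix characterisation ----------

def pvPF (x : List Char) : List (List Char) → List (List Char)
  | [] => [x]
  | h :: t => (x ++ h) :: t

def pvSplit : List Char → List (List Char)
  | [] => [[]]
  | c :: t => if c = '.' then [] :: pvSplit t else pvPF [c] (pvSplit t)

theorem pvPF_ne_nil (x : List Char) (l : List (List Char)) : pvPF x l ≠ [] := by
  cases l <;> simp [pvPF]

theorem pvSplit_ne_nil (l : List Char) : pvSplit l ≠ [] := by
  cases l with
  | nil => simp [pvSplit]
  | cons c t =>
    rw [pvSplit]
    split
    · simp
    · exact pvPF_ne_nil _ _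

theorem pvPF_pf (x y : List Char) (l : List (List Char)) :
    pvPF x (pvPF y l) = pvPF (x ++ y) l := by
  cases l <;> simp [pvPF]

theorem pvPF_nil_id {l : List (List Char)} (h : l ≠ []) : pvPF [] l = l := by
  cases l with
  | nil => exact absurd rfl h
  | cons a t => simp [pvPF]

theorem pvPF_append {x : List Char} {l1 l2 : List (List Char)} (h : l1 ≠ []) :
    pvPF x (l1 ++ l2) = pvPF x l1 ++ l2 := by
  cases l1 with
  | nil => exact absurd rfl h
  | cons a t => simp [pvPF]

theorem pvGo : ∀ (fuel : Nat) (l cur : List Char) (acc : List (List Char)), l.length ≤ fuel →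
    PySem.Chars.splitOn.go ['.'] fuel l cur acc = acc.reverse ++ pvPF cur.reverse (pvSplit l) := by
  intro fuel
  induction fuel with
  | zero =>
    intro l cur acc h
    have hl : l = [] := List.eq_nil_of_length_eq_zero (Nat.le_zero.mp h)
    subst hl
    show ((cur.reverse ++ []) :: acc).reverse = acc.reverse ++ pvPF cur.reverse (pvSplit [])
    simp [pvSplit, pvPF]
  | succ fuel ih =>
    intro l cur acc h
    cases l with
    | nil =>
      show (cur.reverse :: acc).reverse = acc.reverse ++ pvPF cur.reverse (pvSplit [])
      simp [pvSplit, pvPF]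
    | cons c rest =>
      have hgo : PySem.Chars.splitOn.go ['.'] (fuel+1) (c :: rest) cur acc =
          if ['.'].isPrefixOf (c :: rest) then
            PySem.Chars.splitOn.go ['.'] fuel (List.drop 1 (c :: rest)) [] (cur.reverse :: acc)
          else PySem.Chars.splitOn.go ['.'] fuel rest (c :: cur) acc := rfl
      rw [hgo]
      simp only [List.length_cons] at h
      by_cases hc : c = '.'
      · rw [if_pos (by simp [List.isPrefixOf, hc])]
        rw [show List.drop 1 (c :: rest) = rest from rfl]
        rw [ih rest [] (cur.reverse :: acc) (by omega)]
        subst hc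
        obtain ⟨hh, tt, hht⟩ := List.exists_cons_of_ne_nil (pvSplit_ne_nil rest)
        simp [pvSplit, pvPF, hht]
      · rw [if_neg (by simp [List.isPrefixOf]; exact fun h => absurd h.symm hc)]
        rw [ih rest (c :: cur) acc (by omega)]
        simp only [pvSplit, if_neg hc]
        rw [pvPF_pf]
        simp

theorem pvSplitOn_eq (l : List Char) : PySem.Chars.splitOn l ['.'] = pvSplit l := by
  show PySem.Chars.splitOn.go ['.'] (l.length + 1) l [] [] = pvSplit l
  rw [pvGo (l.length + 1) l [] [] (by omega)]
  simp [pvPF_nil_id (pvSplit_ne_nil l)]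

theorem pvJoin_split (l : List Char) : PySem.Chars.join ['.'] (pvSplit l) = l := by
  induction l with
  | nil => simp [pvSplit, PySem.Chars.join_singleton]
  | cons c t ih =>
    obtain ⟨h', t', ht⟩ := List.exists_cons_of_ne_nil (pvSplit_ne_nil t)
    simp only [pvSplit]
    by_cases hc : c = '.'
    · rw [if_pos hc, ht, PySem.Chars.join_cons_cons]
      rw [ht] at ih
      rw [hc]
      simpa using ih
    · rw [if_neg hc, ht, pvPF]
      rw [ht] at ih
      cases t' with
      | nil =>
        rw [PySem.Chars.join_singleton]
        rw [PySem.Chars.join_singleton] at ih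
        simp [ih]
      | cons h'' t'' =>
        rw [PySem.Chars.join_cons_cons]
        rw [PySem.Chars.join_cons_cons] at ih
        simpa using ih

theorem pvJoin_append : ∀ {l1 l2 : List (List Char)}, l1 ≠ [] → l2 ≠ [] →
    PySem.Chars.join ['.'] (l1 ++ l2) =
      PySem.Chars.join ['.'] l1 ++ '.' :: PySem.Chars.join ['.'] l2 := by
  intro l1
  induction l1 with
  | nil => intro l2 h _; exact absurd rfl h
  | cons a t ih =>
    intro l2 _ h2
    cases t with
    | nil =>
      obtain ⟨b, t', hb⟩ := List.exists_cons_of_ne_nil h2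
      subst hb
      rw [List.singleton_append, PySem.Chars.join_cons_cons, PySem.Chars.join_singleton]
      simp
    | cons a' t' =>
      have hih := ih (l2 := l2) (by simp) h2
      have hstep : ((a :: a' :: t') ++ l2) = a :: ((a' :: t') ++ l2) := by simp
      rw [hstep]
      have hcons : (a' :: t') ++ l2 = a' :: (t' ++ l2) := by simp
      rw [hcons] at hih ⊢
      rw [PySem.Chars.join_cons_cons, hih, PySem.Chars.join_cons_cons]
      simp

theorem pvSplit_append (a b : List Char) : pvSplit (a ++ '.' :: b) = pvSplit a ++ pvSplit b := by
  induction a with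
  | nil => rw [List.nil_append]; simp only [pvSplit, if_pos rfl]; rfl
  | cons c t ih =>
    rw [List.cons_append]
    simp only [pvSplit]
    by_cases hc : c = '.'
    · rw [if_pos hc, if_pos hc, ih]; rfl
    · rw [if_neg hc, if_neg hc, ih, pvPF_append (pvSplit_ne_nil t)]

-- the inner parents loop of either port enumerates exactly the dotted prefixes of `path`
theorem pvMem_prefix (path x : String) :
    (∃ i ∈ PySem.List.pyRange 1 (((PySem.Chars.splitOn path.toList ['.']).map String.ofList).length : Int) 1,
      x = PySem.Str.join "." (PySem.List.slice ((PySem.Chars.splitOn path.toList ['.']).map String.ofList) none (some i)))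
    ↔ pvDP x path := by
  rw [pvSplitOn_eq]
  constructor
  · rintro ⟨i, hi, hx⟩
    rw [PySem.List.mem_pyRange_one] at hi
    have h0 : (0:Int) ≤ i := by omega
    rw [PySem.List.slice_to _ h0] at hx
    set n := i.toNat with hn
    have hn1 : 1 ≤ n := by omega
    have hnlt : n < (pvSplit path.toList).length := by
      have := hi.2
      simp only [List.length_map] at this
      omega
    have htoList : x.toList = PySem.Chars.join ['.'] (List.take n (pvSplit path.toList)) := by
      rw [hx, PySem.Str.toList_join]
      have hmt : (List.take n ((pvSplit path.toList).map String.ofList)).map String.toList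
          = List.take n (pvSplit path.toList) := by
        rw [← List.map_take, List.map_map,
          show (String.toList ∘ String.ofList) = id from funext (fun l => String.toList_ofList (l := l)), List.map_id]
      rw [hmt]
      rfl
    have htk : List.take n (pvSplit path.toList) ≠ [] := by
      apply List.ne_nil_of_length_pos
      rw [List.length_take]
      omega
    have hdr : List.drop n (pvSplit path.toList) ≠ [] := by
      apply List.ne_nil_of_length_pos
      rw [List.length_drop]
      omega
    have : path.toList = x.toList ++ '.' :: PySem.Chars.join ['.'] (List.drop n (pvSplit path.toList)) := by
      conv_lhs => rw [← pvJoin_split path.toList, ← List.take_append_drop n (pvSplit path.toList)]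
      rw [pvJoin_append htk hdr, htoList]
    rw [pvDP, this]
    exact ⟨PySem.Chars.join ['.'] (List.drop n (pvSplit path.toList)), by simp⟩
  · intro h
    obtain ⟨r, hr⟩ := h
    have hpl : path.toList = x.toList ++ '.' :: r := by
      rw [← hr]; simp
    have hsplit : pvSplit path.toList = pvSplit x.toList ++ pvSplit r := by
      rw [hpl, pvSplit_append]
    set n := (pvSplit x.toList).length with hn
    have hn1 : 1 ≤ n := by
      have := pvSplit_ne_nil x.toList
      rw [hn]
      cases h : pvSplit x.toList
      · exact absurd h this
      · simp [h]
    have hnlt : n < (pvSplit path.toList).length := by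
      rw [hsplit, List.length_append]
      have := pvSplit_ne_nil r
      have : 0 < (pvSplit r).length := List.length_pos_of_ne_nil this
      omega
    refine ⟨(n : Int), ?_, ?_⟩
    · rw [PySem.List.mem_pyRange_one]
      constructor
      · exact_mod_cast hn1
      · simp only [List.length_map]
        exact_mod_cast hnlt
    · rw [PySem.List.slice_to _ (Int.natCast_nonneg n)]
      rw [Int.toNat_natCast]
      rw [← String.toList_inj, PySem.Str.toList_join]
      rw [← List.map_take, hsplit, List.take_left' hn.symm, List.map_map]
      rw [show (String.toList ∘ String.ofList) = id from funext (fun l => String.toList_ofList (l := l)), List.map_id,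
        show (".").toList = ['.'] from rfl, pvJoin_split]

-- ---------- characterising A's parent enumeration and scan ----------

theorem mem_aParents {σ : List String} {x : String} :
    x ∈ aParents σ ↔ ∃ y ∈ σ, pvDP x y := by
  rw [aParents]
  have hgen : ∀ (l : List String) (acc : PySem.Set String),
      x ∈ l.foldl (fun parents path =>
        let parts : List String := (PySem.Chars.splitOn path.toList ['.']).map String.ofList
        (PySem.List.pyRange 1 (parts.length : Int) 1).foldl
          (fun parents i =>
            PySem.Set.add parents (PySem.Str.join "." (PySem.List.slice parts none (some i))))
          parents) acc
      ↔ x ∈ acc ∨ ∃ y ∈ l, pvDP x y := by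
    intro l
    induction l with
    | nil => intro acc; simp
    | cons y t ih =>
      intro acc
      rw [List.foldl_cons, ih]
      rw [PySem.Set.mem_foldl_add]
      rw [pvMem_prefix y x]
      simp [or_assoc]
  rw [hgen]
  simp [PySem.Set.empty]

theorem pvCond_iff {cf : List (String × String)} {σ : List String} {p : String} :
    (PySem.Set.ofList (pvCC cf p) ≠ [] ∧
      PySem.Set.equal (PySem.Set.ofList (pvCC cf p))
        (PySem.Set.ofList (σ.filter (fun q => PySem.Str.startswith q (p ++ ".")))) = true)
    ↔ pvEligB cf σ p = true := by
  rw [PySem.Set.equal_iff, pvEligB_iff]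
  constructor
  · rintro ⟨h1, h2⟩
    have hcc : pvCC cf p ≠ [] := by
      intro hc
      rw [hc] at h1
      exact h1 rfl
    refine ⟨hcc, fun x hx => ?_, fun x hx hdp => ?_⟩
    · have hm := (h2 x).mp ((PySem.Set.mem_ofList _ _).mpr hx)
      rw [PySem.Set.mem_ofList, List.mem_filter] at hm
      exact hm.1
    · have hmem : x ∈ PySem.Set.ofList (σ.filter (fun q => PySem.Str.startswith q (p ++ "."))) := by
        rw [PySem.Set.mem_ofList, List.mem_filter]
        exact ⟨hx, (pvSw_iff x p).mpr hdp⟩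
      exact (PySem.Set.mem_ofList _ _).mp ((h2 x).mpr hmem)
  · rintro ⟨h1, h2, h3⟩
    refine ⟨fun hc => ?_, fun x => ?_⟩
    · obtain ⟨z, hz⟩ := List.exists_mem_of_ne_nil _ h1
      have hm : z ∈ PySem.Set.ofList (pvCC cf p) := (PySem.Set.mem_ofList _ _).mpr hz
      rw [hc] at hm
      simp at hm
    · rw [PySem.Set.mem_ofList, PySem.Set.mem_ofList, List.mem_filter]
      constructor
      · intro hzc
        exact ⟨h2 x hzc, (pvSw_iff x p).mpr (mem_pvCC.mp hzc).2⟩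
      · rintro ⟨hzσ, hzsw⟩
        exact h3 x hzσ ((pvSw_iff x p).mp hzsw)

theorem pvCC_nil_of_ofList_nil {cf : List (String × String)} {p : String}
    (h : PySem.Set.ofList (pvCC cf p) = []) : pvCC cf p = [] := by
  rcases hcs : pvCC cf p with _ | ⟨z, zs⟩
  · rfl
  · rw [hcs, PySem.Set.ofList_cons] at h
    simp at h

theorem aScan_none {cf : List (String × String)} {σ : PySem.Set String} :
    ∀ {L : List String}, aScan cf σ L = none → ∀ p ∈ L, pvEligB cf σ p = false := by
  intro L
  induction L with
  | nil => intro _ p hp; simp at hp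
  | cons parent rest ih =>
    intro h p hp
    rw [aScan] at h
    dsimp only at h
    split_ifs at h with h1 h2
    · rcases List.mem_cons.mp hp with rfl | hp'
      · rw [← Bool.not_eq_true, pvEligB_iff]
        rintro ⟨hne, -, -⟩
        exact hne (pvCC_nil_of_ofList_nil h1)
      · exact ih h p hp'
    · rcases List.mem_cons.mp hp with rfl | hp'
      · rw [← Bool.not_eq_true]
        intro he
        exact h2 (pvCond_iff.mpr he).2
      · exact ih h p hp'

theorem aScan_some {cf : List (String × String)} {σ : PySem.Set String} :
    ∀ {L : List String} {σ' : PySem.Set String}, aScan cf σ L = some σ' →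
      ∃ l1 q l2, L = l1 ++ q :: l2 ∧ (∀ p ∈ l1, pvEligB cf σ p = false) ∧
        pvEligB cf σ q = true ∧ pvEqv σ' (pvCollapse σ q) := by
  intro L
  induction L with
  | nil => intro σ' h; simp [aScan] at h
  | cons parent rest ih =>
    intro σ' h
    rw [aScan] at h
    dsimp only at h
    split_ifs at h with h1 h2
    · obtain ⟨l1, q, l2, hL, hl1, hq, hcol⟩ := ih h
      refine ⟨parent :: l1, q, l2, by rw [hL]; rfl, ?_, hq, hcol⟩
      intro p hp
      rcases List.mem_cons.mp hp with rfl | hp'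
      · rw [← Bool.not_eq_true, pvEligB_iff]
        rintro ⟨hne, -, -⟩
        exact hne (pvCC_nil_of_ofList_nil h1)
      · exact hl1 p hp'
    · injection h with h
      subst h
      refine ⟨[], parent, rest, rfl, by simp, ?_, ?_⟩
      · exact pvCond_iff.mp ⟨h1, h2⟩
      · intro x
        rw [mem_pvCollapse, PySem.Set.mem_add, PySem.Set.mem_diff, PySem.Set.mem_ofList,
          List.mem_filter]
        constructor
        · rintro (⟨hxσ, hnx⟩ | rfl)
          · exact Or.inl ⟨hxσ, fun hdp => hnx ⟨hxσ, (pvSw_iff x parent).mpr hdp⟩⟩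
          · exact Or.inr rfl
        · rintro (⟨hxσ, hnx⟩ | rfl)
          · exact Or.inl ⟨hxσ, fun hc => hnx ((pvSw_iff x parent).mp hc.2)⟩
          · exact Or.inr rfl
    · obtain ⟨l1, q, l2, hL, hl1, hq, hcol⟩ := ih h
      refine ⟨parent :: l1, q, l2, by rw [hL]; rfl, ?_, hq, hcol⟩
      intro p hp
      rcases List.mem_cons.mp hp with rfl | hp'
      · rw [← Bool.not_eq_true]
        intro he
        exact h2 (pvCond_iff.mpr he).2
      · exact hl1 p hp'

-- ---------- A's loop against the canonical single pass ----------

theorem aLoop_eqv {cf : List (String × String)} :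
    ∀ (n : Nat) (σ : PySem.Set String), pvMeasure σ ≤ n →
      ∀ (L : List String), (∀ p : String, (∃ y ∈ σ, pvDP p y) → p ∈ L) →
      List.Pairwise (fun a b => b.toList.length ≤ a.toList.length) L →
      pvEqv (aLoop cf σ) (pvFold cf L σ) := by
  intro n
  induction n using Nat.strong_induction_on with
  | _ n ih =>
    intro σ hm L hL hpw
    rw [aLoop]
    cases hscan : aScan cf σ
        (PySem.List.sorted (aParents σ) (fun x => -(PySem.Str.len x)) false) with
    | none =>
      have hnone := aScan_none hscan
      have hall : ∀ p ∈ L, pvEligB cf σ p = false := by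
        intro p hp
        by_cases he : pvEligB cf σ p = true
        · have hpar : p ∈ aParents σ := mem_aParents.mpr (pvElig_exists_child he)
          have hinSL : p ∈ PySem.List.sorted (aParents σ) (fun x => -(PySem.Str.len x)) false :=
            ((PySem.List.sorted_perm _ _ _).mem_iff).mpr hpar
          exact hnone p hinSL
        · simpa using he
      rw [pvFold_id hall]
      exact pvEqv_refl σ
    | some σ' =>
      obtain ⟨l1, q, l2, hdec, hl1, hq, hcol⟩ := aScan_some hscan
      have hSLpw : List.Pairwise (fun a b => b.toList.length ≤ a.toList.length)
          (PySem.List.sorted (aParents σ) (fun x => -(PySem.Str.len x)) false) := by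
        have hp := PySem.List.sorted_pairwise (aParents σ) (fun x => -(PySem.Str.len x))
        refine hp.imp ?_
        intro a b hab
        rw [PySem.Str.len_eq, PySem.Str.len_eq] at hab
        omega
      have hlong : ∀ p : String, q.toList.length < p.toList.length →
          pvEligB cf σ p = false := by
        intro p hlp
        by_cases he : pvEligB cf σ p = true
        · have hpar : p ∈ aParents σ := mem_aParents.mpr (pvElig_exists_child he)
          have hinSL : p ∈ PySem.List.sorted (aParents σ) (fun x => -(PySem.Str.len x)) false :=
            ((PySem.List.sorted_perm _ _ _).mem_iff).mpr hpar
          rw [hdec] at hinSL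
          rcases List.mem_append.mp hinSL with hin1 | hin2
          · exact absurd he (by simp [hl1 p hin1])
          · exfalso
            have hpw2 : List.Pairwise (fun a b => b.toList.length ≤ a.toList.length) (q :: l2) := by
              have hsub : (q :: l2).Sublist
                  (PySem.List.sorted (aParents σ) (fun x => -(PySem.Str.len x)) false) := by
                rw [hdec]
                exact List.sublist_append_right _ _
              exact List.Pairwise.sublist hsub hSLpw
            rcases List.mem_cons.mp hin2 with rfl | hin2'
            · omega
            · have := (List.pairwise_cons.mp hpw2).1 p hin2'
              omega
        · simpa using he
      have hqL : q ∈ L := hL q (pvElig_exists_child hq)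
      have hL' : ∀ p : String, (∃ y ∈ σ', pvDP p y) → p ∈ L := by
        rintro p ⟨y, hy, hdp⟩
        rw [hcol y] at hy
        rcases mem_pvCollapse.mp hy with ⟨hyσ, -⟩ | rfl
        · exact hL p ⟨y, hyσ, hdp⟩
        · obtain ⟨z, hzσ, hdq⟩ := pvElig_exists_child hq
          exact hL p ⟨z, hzσ, pvDP_trans hdp hdq⟩
      have hdecm : pvMeasure σ' < pvMeasure σ := aScan_dec hscan
      have hih := ih (pvMeasure σ') (lt_of_lt_of_le hdecm hm) σ' le_rfl L hL' hpw
      have h1 : pvEqv (pvFold cf L σ') (pvFold cf L (pvCollapse σ q)) := pvFold_congr L hcol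
      have h2 : pvEqv (pvFold cf L σ) (pvFold cf L (pvCollapse σ q)) := pvSwap L σ hpw hqL hq hlong
      exact pvEqv_trans hih (pvEqv_trans h1 (pvEqv_symm h2))

theorem aScan_nodup : ∀ {l : List String} {cf : List (String × String)} {σ σ' : PySem.Set String},
    aScan cf σ l = some σ' → σ.Nodup → σ'.Nodup := by
  intro l
  induction l with
  | nil => intro cf σ σ' h _; simp [aScan] at h
  | cons parent rest ih =>
    intro cf σ σ' h hnd
    rw [aScan] at h
    dsimp only at h
    split_ifs at h with h1 h2
    · exact ih h hnd
    · injection h with h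
      subst h
      exact PySem.Set.nodup_add _ _ (PySem.Set.nodup_diff _ _ hnd)
    · exact ih h hnd

theorem nodup_aLoop {cf : List (String × String)} :
    ∀ (n : Nat) (σ : PySem.Set String), pvMeasure σ ≤ n → σ.Nodup → (aLoop cf σ).Nodup := by
  intro n
  induction n using Nat.strong_induction_on with
  | _ n ih =>
    intro σ hm hnd
    rw [aLoop]
    cases hscan : aScan cf σ
        (PySem.List.sorted (aParents σ) (fun x => -(PySem.Str.len x)) false) with
    | none => exact hnd
    | some σ' =>
      exact ih (pvMeasure σ') (lt_of_lt_of_le (aScan_dec hscan) hm) σ' le_rfl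
        (aScan_nodup hscan hnd)

-- B's literal fold body
theorem bfold_eqv {cf : List (String × String)} :
    ∀ (L : List String) (σp σa : List String), pvEqv σp σa →
      pvEqv (L.foldl (fun result parent =>
        let children_class : PySem.Set String :=
          PySem.Set.ofList ((cf.map Prod.fst).filter
            (fun p => PySem.Str.startswith p (parent ++ ".")))
        if children_class ≠ [] ∧ PySem.Set.equal children_class
            (PySem.Set.ofList (result.filter (fun p => PySem.Str.startswith p (parent ++ ".")))) = true
        then PySem.Set.add (PySem.Set.diff result children_class) parent
        else result) σp)
      (pvFold cf L σa) := by
  intro L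
  induction L with
  | nil => intro σp σa h; exact h
  | cons parent rest ih =>
    intro σp σa h
    rw [List.foldl_cons]
    show pvEqv _ (pvFold cf rest (pvStep cf σa parent))
    apply ih
    dsimp only
    show pvEqv
      (if PySem.Set.ofList (pvCC cf parent) ≠ [] ∧
          PySem.Set.equal (PySem.Set.ofList (pvCC cf parent))
            (PySem.Set.ofList (σp.filter (fun q => PySem.Str.startswith q (parent ++ ".")))) = true
        then PySem.Set.add (PySem.Set.diff σp (PySem.Set.ofList (pvCC cf parent))) parent
        else σp)
      (pvStep cf σa parent)
    have hcond : (PySem.Set.ofList (pvCC cf parent) ≠ [] ∧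
        PySem.Set.equal (PySem.Set.ofList (pvCC cf parent))
          (PySem.Set.ofList (σp.filter (fun q => PySem.Str.startswith q (parent ++ ".")))) = true)
        ↔ pvEligB cf σa parent = true := by
      rw [pvCond_iff, pvEligB_congr h]
    rw [pvStep]
    by_cases he : pvEligB cf σa parent = true
    · rw [if_pos he, if_pos (hcond.mpr he)]
      have heP : pvEligB cf σp parent = true := by
        rw [pvEligB_congr h]
        exact he
      rw [pvEligB_iff] at heP
      intro x
      rw [PySem.Set.mem_add, PySem.Set.mem_diff, mem_pvCollapse]
      constructor
      · rintro (⟨hxσ, hnc⟩ | rfl)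
        · refine Or.inl ⟨(h x).mp hxσ, fun hdp => ?_⟩
          exact hnc ((PySem.Set.mem_ofList _ _).mpr (heP.2.2 x hxσ hdp))
        · exact Or.inr rfl
      · rintro (⟨hxσ, hnd⟩ | rfl)
        · refine Or.inl ⟨(h x).mpr hxσ, fun hc => ?_⟩
          exact hnd (mem_pvCC.mp ((PySem.Set.mem_ofList _ _).mp hc)).2
        · exact Or.inr rfl
    · rw [if_neg he, if_neg (fun hc => he (hcond.mp hc))]
      exact h

theorem nodup_bfold {cf : List (String × String)} :
    ∀ (L : List String) (σ : List String), σ.Nodup →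
      (L.foldl (fun result parent =>
        let children_class : PySem.Set String :=
          PySem.Set.ofList ((cf.map Prod.fst).filter
            (fun p => PySem.Str.startswith p (parent ++ ".")))
        if children_class ≠ [] ∧ PySem.Set.equal children_class
            (PySem.Set.ofList (result.filter (fun p => PySem.Str.startswith p (parent ++ ".")))) = true
        then PySem.Set.add (PySem.Set.diff result children_class) parent
        else result) σ).Nodup := by
  intro L
  induction L with
  | nil => intro σ h; exact h
  | cons parent rest ih =>
    intro σ h
    rw [List.foldl_cons]
    apply ih
    dsimp only
    split
    · exact PySem.Set.nodup_add _ _ (PySem.Set.nodup_diff _ _ h)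
    · exact h

theorem collapse_removals_py_equal (removed : List String) (class_flat : List (String × String)) :
    collapse_removals_py removed class_flat = collapse_removals_py_alt removed class_flat := by
  by_cases hrem : removed = []
  · subst hrem; rfl
  · rw [collapse_removals_py, if_neg hrem, collapse_removals_py_alt]
    dsimp only
    set S0 : PySem.Set String := PySem.Set.ofList removed with hS0
    set PB : PySem.Set String := PySem.Set.ofList
      (removed.flatMap (fun path =>
        let parts : List String := (PySem.Chars.splitOn path.toList ['.']).map String.ofList
        (PySem.List.pyRange 1 (parts.length : Int) 1).map
          (fun i => PySem.Str.join "." (PySem.List.slice parts none (some i))))) with hPB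
    set L : List String := PySem.List.sorted PB (fun x => PySem.Str.len x) true with hLdef
    set BF : List String := L.foldl (fun result parent =>
        let children_class : PySem.Set String :=
          PySem.Set.ofList ((class_flat.map Prod.fst).filter
            (fun p => PySem.Str.startswith p (parent ++ ".")))
        if children_class ≠ [] ∧ PySem.Set.equal children_class
            (PySem.Set.ofList (result.filter (fun p => PySem.Str.startswith p (parent ++ ".")))) = true
        then PySem.Set.add (PySem.Set.diff result children_class) parent
        else result) S0 with hBF
    have hL : ∀ p : String, (∃ y ∈ S0, pvDP p y) → p ∈ L := by
      rintro p ⟨y, hy, hdp⟩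
      rw [hS0, PySem.Set.mem_ofList] at hy
      have hmem : p ∈ PB := by
        rw [hPB, PySem.Set.mem_ofList, List.mem_flatMap]
        refine ⟨y, hy, ?_⟩
        dsimp only
        rw [List.mem_map]
        obtain ⟨i, hi, hx⟩ := (pvMem_prefix y p).mpr hdp
        exact ⟨i, hi, hx.symm⟩
      rw [hLdef]
      exact ((PySem.List.sorted_perm _ _ _).mem_iff).mpr hmem
    have hpw : List.Pairwise (fun a b => b.toList.length ≤ a.toList.length) L := by
      rw [hLdef]
      have hp := PySem.List.sorted_pairwise_rev PB (fun x => PySem.Str.len x)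
      refine hp.imp ?_
      intro a b hab
      rw [PySem.Str.len_eq, PySem.Str.len_eq] at hab
      omega
    have EA : pvEqv (aLoop class_flat S0) (pvFold class_flat L S0) :=
      aLoop_eqv (pvMeasure S0) S0 le_rfl L hL hpw
    have EB : pvEqv BF (pvFold class_flat L S0) := by
      rw [hBF]
      exact bfold_eqv L S0 S0 (pvEqv_refl S0)
    have EAB : pvEqv (aLoop class_flat S0) BF := pvEqv_trans EA (pvEqv_symm EB)
    have NA : (aLoop class_flat S0).Nodup :=
      nodup_aLoop (pvMeasure S0) S0 le_rfl (PySem.Set.nodup_ofList removed)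
    have NB : BF.Nodup := by
      rw [hBF]
      exact nodup_bfold L S0 (PySem.Set.nodup_ofList removed)
    have hperm : (aLoop class_flat S0).Perm BF := (List.perm_ext_iff_of_nodup NA NB).mpr EAB
    have hys := PySem.List.sorted_perm (aLoop class_flat S0) (fun x : String => x) false
    have hnd : (PySem.List.sorted (aLoop class_flat S0) (fun x : String => x) false).Nodup :=
      (hys.nodup_iff).mpr NA
    have hle := PySem.List.sorted_pairwise (aLoop class_flat S0) (fun x : String => x)
    have hlt : (PySem.List.sorted (aLoop class_flat S0) (fun x : String => x) false).Pairwise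
        (fun a b => (fun x : String => x) a < (fun x : String => x) b) := by
      refine (List.Pairwise.and hle hnd).imp ?_
      rintro a b ⟨h1, h2⟩
      exact lt_of_le_of_ne h1 h2
    have hfin := PySem.List.sorted_eq_of_perm_of_pairwise_lt BF
      (PySem.List.sorted (aLoop class_flat S0) (fun x : String => x) false)
      (fun x : String => x) (hys.trans hperm) hlt
    exact hfin.symm

-- ===== VERDICT (by name: the statement is the Claim_ definition above) =====
theorem collapse_removals_py_spec : Claim_equal_collapse_removals_py := by
  intro removed class_flat _
  exact collapse_removals_py_equal removed class_flat
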